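-- pv_equiv track=rewrite | github.com/bhumikamittal7/cs1349 | a3/dfa.py | is_dfa
-- ===== SOURCE A (Python) =====
-- def is_dfa(states, alphabet, start_state, accept_states, transitions):
--     # a dfa is a valid dfa if:
--     # 1. the start state is in the set of states
--     # 2. the accept states are a subset of the states
--     # 3. for each state and symbol, there is exactly one transition
--     # 4. the alphabet is not empty
--     if start_state not in states:
--         return False
--     if not set(accept_states).issubset(set(states)):
--         return False
--     if len(alphabet) == 0:
--         return False
--     for state in states:
--         for symbol in alphabet:
--             transitions_from_state = [t for t in transitions if t[0] == state and t[1] == symbol]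
--             if len(transitions_from_state) != 1:
--                 return False
--     return True
-- ===== SOURCE B (Python) =====
-- def is_dfa(states, alphabet, start_state, accept_states, transitions):
--     # single pass: count each transition that leaves a known state on a known
--     # symbol, keyed by (state, symbol); valid iff every required pair is hit
--     # exactly once, i.e. the counter has |set(states)|*|set(alphabet)| keys,
--     # all with count 1.
--     counts = {}
--     for t in transitions:
--         if t[0] in states and t[1] in alphabet:
--             k = (t[0], t[1])
--             counts[k] = counts.get(k, 0) + 1
--     return (start_state in states
--             and all(a in states for a in accept_states)
--             and len(alphabet) > 0
--             and len(counts) == len(set(states)) * len(set(alphabet))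
--             and all(v == 1 for v in counts.values()))
-- ===== Notes on version B (the rewrite author's own statement) =====
-- stated objective: alternative
-- what changed: Replaced the nested states x alphabet scan (each pair re-filtering all transitions) and the if-guard chain with a single counting pass over the transitions building a dict keyed by (state, symbol) for transitions leaving a known state on a known symbol, returning one conjunction that checks the counter has exactly |set(states)|*|set(alphabet)| keys all with count 1.
import Mathlib
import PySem

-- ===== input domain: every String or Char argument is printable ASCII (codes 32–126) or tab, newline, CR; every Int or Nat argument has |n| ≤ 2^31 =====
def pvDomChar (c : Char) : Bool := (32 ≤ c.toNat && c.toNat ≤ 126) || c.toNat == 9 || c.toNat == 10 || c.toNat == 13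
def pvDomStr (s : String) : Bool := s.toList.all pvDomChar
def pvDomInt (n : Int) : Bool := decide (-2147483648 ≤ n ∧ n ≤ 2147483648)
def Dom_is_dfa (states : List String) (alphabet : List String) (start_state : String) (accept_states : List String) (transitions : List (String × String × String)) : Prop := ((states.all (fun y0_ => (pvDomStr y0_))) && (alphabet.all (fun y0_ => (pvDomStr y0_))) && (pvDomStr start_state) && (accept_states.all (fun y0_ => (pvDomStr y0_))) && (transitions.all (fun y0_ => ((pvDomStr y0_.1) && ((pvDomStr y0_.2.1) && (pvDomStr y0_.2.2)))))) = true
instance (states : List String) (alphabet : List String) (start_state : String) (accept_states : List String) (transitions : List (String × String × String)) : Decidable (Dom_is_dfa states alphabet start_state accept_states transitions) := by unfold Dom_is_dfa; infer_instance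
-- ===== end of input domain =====

-- B replaces A's nested states×alphabet scan (each pair re-filtering all transitions) by a
-- single counting pass over the transitions plus an aggregate size/uniformity check;
-- equal return value, proved on the whole domain.

-- ===== PORT A =====
def is_dfa (states : List String) (alphabet : List String) (start_state : String) (accept_states : List String) (transitions : List (String × String × String)) : Bool :=
  if ¬ states.contains start_state then false
  else if ¬ PySem.Set.issubset (PySem.Set.ofList accept_states) (PySem.Set.ofList states) then false
  else if alphabet.length == 0 then false
  else
    -- for state in states: for symbol in alphabet: … return False  ≡  nested .all
    states.all (fun state => alphabet.all (fun symbol =>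
      ((transitions.filter (fun t => t.1 == state && t.2.1 == symbol)).length == 1)))

-- B-side helper: the counting pass (counts[k] = counts.get(k, 0) + 1 over valid transitions)
def pvCounts (states : List String) (alphabet : List String) (transitions : List (String × String × String)) : PySem.Dict (String × String) Int :=
  transitions.foldl (fun d t =>
    if states.contains t.1 && alphabet.contains t.2.1 then
      d.insert (t.1, t.2.1) (d.getD (t.1, t.2.1) 0 + 1)
    else d) PySem.Dict.empty

-- ===== PORT B =====
def is_dfa_alt (states : List String) (alphabet : List String) (start_state : String) (accept_states : List String) (transitions : List (String × String × String)) : Bool :=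
  let counts := pvCounts states alphabet transitions
  states.contains start_state
    && accept_states.all (fun a => states.contains a)
    && decide (0 < alphabet.length)
    && ((counts.size : Int) == PySem.Set.len (PySem.Set.ofList states) * PySem.Set.len (PySem.Set.ofList alphabet))
    && counts.values.all (fun v => v == 1)

-- ===== PRECONDITION & SPEC =====
def Spec_is_dfa (states : List String) (alphabet : List String) (start_state : String) (accept_states : List String) (transitions : List (String × String × String)) (out : Bool) : Prop := out = is_dfa_alt states alphabet start_state accept_states transitions
instance (states : List String) (alphabet : List String) (start_state : String) (accept_states : List String) (transitions : List (String × String × String)) (out : Bool) : Decidable (Spec_is_dfa states alphabet start_state accept_states transitions out) := by unfold Spec_is_dfa; infer_instance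

-- ===== CLAIM (what is proved, stated in full; the proofs are below) =====
def Claim_equal_is_dfa : Prop := ∀ (states : List String) (alphabet : List String) (start_state : String) (accept_states : List String) (transitions : List (String × String × String)), Dom_is_dfa states alphabet start_state accept_states transitions → Spec_is_dfa states alphabet start_state accept_states transitions (is_dfa states alphabet start_state accept_states transitions)

-- ===== LEMMAS AND PROOFS =====

-- a conditional fold is the fold over the filtered, projected list
theorem pv_foldl_filter_map {α β γ : Type} (f : α → Bool) (proj : α → β) (g : γ → β → γ)
    (l : List α) (init : γ) :
    l.foldl (fun d t => if f t then g d (proj t) else d) init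
      = ((l.filter f).map proj).foldl g init := by
  induction l generalizing init with
  | nil => rfl
  | cons x xs ih =>
    by_cases hx : f x <;> simp [hx, ih]

-- len(set(l)) = toFinset card
theorem pv_setlen {α : Type} [BEq α] [LawfulBEq α] [DecidableEq α] (l : List α) :
    PySem.Set.len (PySem.Set.ofList l) = (l.toFinset.card : Int) := by
  have hnd : (PySem.Set.ofList l).Nodup := PySem.Set.nodup_ofList l
  have hfs : (PySem.Set.ofList l).toFinset = l.toFinset := by
    ext x; simp [PySem.Set.mem_ofList]
  simp [PySem.Set.len, ← hfs, List.toFinset_card_of_nodup hnd]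

-- count of a valid key among B's counted keys = A's per-pair transition count
theorem pv_count_keys (states alphabet : List String) (transitions : List (String × String × String))
    (s a : String) (hs : s ∈ states) (ha : a ∈ alphabet) :
    ((transitions.filter (fun t => states.contains t.1 && alphabet.contains t.2.1)).map
      (fun t => (t.1, t.2.1))).count (s, a)
      = transitions.countP (fun t => t.1 == s && t.2.1 == a) := by
  rw [List.count, List.countP_map, List.countP_filter]
  apply List.countP_congr
  intro t _
  by_cases h1 : t.1 = s <;> by_cases h2 : t.2.1 = a <;>
    simp [Function.comp, h1, h2, hs, ha]

-- the combinatorial core: A's nested exactly-one-transition check equals B's counter census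
theorem pv_core (states alphabet : List String) (transitions : List (String × String × String)) :
    (states.all (fun state => alphabet.all (fun symbol =>
      ((transitions.filter (fun t => t.1 == state && t.2.1 == symbol)).length == 1))))
    = ((((PySem.Dict.counter ((transitions.filter (fun t => states.contains t.1 && alphabet.contains t.2.1)).map (fun t => (t.1, t.2.1)))).size : Int)
          == PySem.Set.len (PySem.Set.ofList states) * PySem.Set.len (PySem.Set.ofList alphabet)) &&
        (PySem.Dict.counter ((transitions.filter (fun t => states.contains t.1 && alphabet.contains t.2.1)).map (fun t => (t.1, t.2.1)))).values.all (fun v => v == 1)) := by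
  generalize hK : (transitions.filter (fun t => states.contains t.1 && alphabet.contains t.2.1)).map (fun t => (t.1, t.2.1)) = keys
  have hsub : keys.toFinset ⊆ states.toFinset ×ˢ alphabet.toFinset := by
    intro p hp
    simp only [List.mem_toFinset, ← hK, List.mem_map, List.mem_filter] at hp
    obtain ⟨t, ⟨_, hf⟩, rfl⟩ := hp
    simp only [Bool.and_eq_true, List.contains_iff_mem] at hf
    simp [Finset.mem_product, hf.1, hf.2]
  have hA : (states.all (fun state => alphabet.all (fun symbol =>
      ((transitions.filter (fun t => t.1 == state && t.2.1 == symbol)).length == 1)))) = true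
      ↔ ∀ s ∈ states, ∀ a ∈ alphabet,
          transitions.countP (fun t => t.1 == s && t.2.1 == a) = 1 := by
    simp [List.all_eq_true, ← List.countP_eq_length_filter]
  have hsize : (PySem.Dict.counter keys).size = (PySem.Set.ofList keys).length := by
    simp [PySem.Dict.size, PySem.Dict.items_counter]
  have hvals : (PySem.Dict.counter keys).values.all (fun v => v == 1) = true
      ↔ ∀ k ∈ keys, keys.count k = 1 := by
    simp [PySem.Dict.values, PySem.Dict.items_counter, List.all_eq_true, PySem.Set.mem_ofList]
  have hB : ((((PySem.Dict.counter keys).size : Int)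
          == PySem.Set.len (PySem.Set.ofList states) * PySem.Set.len (PySem.Set.ofList alphabet)) &&
        (PySem.Dict.counter keys).values.all (fun v => v == 1)) = true
      ↔ keys.Nodup ∧ keys.length = states.toFinset.card * alphabet.toFinset.card := by
    rw [Bool.and_eq_true, hvals, beq_iff_eq, hsize, pv_setlen states, pv_setlen alphabet]
    have hset : (PySem.Set.ofList keys).length = keys.toFinset.card := by
      have hnd : (PySem.Set.ofList keys).Nodup := PySem.Set.nodup_ofList keys
      have hfs : (PySem.Set.ofList keys).toFinset = keys.toFinset := by
        ext x; simp [PySem.Set.mem_ofList]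
      rw [← hfs, List.toFinset_card_of_nodup hnd]
    rw [hset]
    constructor
    · rintro ⟨hcard, hone⟩
      have hnd : keys.Nodup := by
        rw [List.nodup_iff_count]
        intro p
        by_cases hp : p ∈ keys
        · rw [hone p hp]
        · rw [List.count_eq_zero_of_not_mem hp]; omega
      refine ⟨hnd, ?_⟩
      have := List.toFinset_card_of_nodup hnd
      have hcard' : keys.toFinset.card = states.toFinset.card * alphabet.toFinset.card := by
        exact_mod_cast hcard
      omega
    · rintro ⟨hnd, hlen⟩
      refine ⟨?_, fun k hk => ?_⟩
      · rw [List.toFinset_card_of_nodup hnd]; exact_mod_cast hlen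
      · have hle1 : keys.count k ≤ 1 := List.nodup_iff_count.mp hnd k
        have hge1 : 1 ≤ keys.count k := List.count_pos_iff.mpr hk
        omega
  have hcardprod : (states.toFinset ×ˢ alphabet.toFinset).card
      = states.toFinset.card * alphabet.toFinset.card := Finset.card_product _ _
  have main : (∀ s ∈ states, ∀ a ∈ alphabet,
        transitions.countP (fun t => t.1 == s && t.2.1 == a) = 1)
      ↔ (keys.Nodup ∧ keys.length = states.toFinset.card * alphabet.toFinset.card) := by
    constructor
    · intro hP
      have hcnt : ∀ p ∈ keys.toFinset, keys.count p = 1 := by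
        intro p hp
        have hp' := hsub hp
        rw [Finset.mem_product, List.mem_toFinset, List.mem_toFinset] at hp'
        obtain ⟨s, a⟩ := p
        rw [← hK, pv_count_keys states alphabet transitions s a hp'.1 hp'.2]
        exact hP s hp'.1 a hp'.2
      have hnd : keys.Nodup := by
        rw [List.nodup_iff_count]
        intro p
        by_cases hp : p ∈ keys
        · rw [hcnt p (List.mem_toFinset.mpr hp)]
        · rw [List.count_eq_zero_of_not_mem hp]; omega
      refine ⟨hnd, ?_⟩
      have heq : keys.toFinset = states.toFinset ×ˢ alphabet.toFinset := by
        apply Finset.Subset.antisymm hsub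
        intro p hp
        rw [Finset.mem_product, List.mem_toFinset, List.mem_toFinset] at hp
        obtain ⟨s, a⟩ := p
        have hc : keys.count (s, a) = 1 := by
          rw [← hK, pv_count_keys states alphabet transitions s a hp.1 hp.2]
          exact hP s hp.1 a hp.2
        rw [List.mem_toFinset]
        exact List.count_pos_iff.mp (by omega)
      rw [← List.toFinset_card_of_nodup hnd, heq, hcardprod]
    · rintro ⟨hnd, hlen⟩
      have heq : keys.toFinset = states.toFinset ×ˢ alphabet.toFinset := by
        apply Finset.eq_of_subset_of_card_le hsub
        rw [hcardprod, ← hlen, List.toFinset_card_of_nodup hnd]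
      intro s hs a ha
      have hmem : (s, a) ∈ keys := by
        rw [← List.mem_toFinset, heq, Finset.mem_product]
        exact ⟨List.mem_toFinset.mpr hs, List.mem_toFinset.mpr ha⟩
      have hle1 : keys.count (s, a) ≤ 1 := List.nodup_iff_count.mp hnd (s, a)
      have hge1 : 1 ≤ keys.count (s, a) := List.count_pos_iff.mpr hmem
      rw [← pv_count_keys states alphabet transitions s a hs ha, hK]
      omega
  rcases hb : ((((PySem.Dict.counter keys).size : Int)
          == PySem.Set.len (PySem.Set.ofList states) * PySem.Set.len (PySem.Set.ofList alphabet)) &&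
        (PySem.Dict.counter keys).values.all (fun v => v == 1)) with _ | _
  · by_contra hA'
    rw [Bool.not_eq_false] at hA'
    exact absurd (hB.mpr (main.mp (hA.mp hA'))) (by rw [hb]; simp)
  · exact hA.mpr (main.mpr (hB.mp hb))

-- A's subset guard equals B's all-membership guard
theorem pv_subset_eq (accept_states states : List String) :
    PySem.Set.issubset (PySem.Set.ofList accept_states) (PySem.Set.ofList states)
      = accept_states.all (fun a => states.contains a) := by
  rw [Bool.eq_iff_iff, PySem.Set.issubset_iff]
  simp [PySem.Set.mem_ofList, List.all_eq_true]

-- ===== VERDICT (by name: the statement is the Claim_ definition above) =====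
theorem is_dfa_spec : Claim_equal_is_dfa := by
  intro states alphabet start_state accept_states transitions _
  unfold Spec_is_dfa is_dfa is_dfa_alt
  have hc0 := pv_foldl_filter_map
    (fun t : String × String × String => states.contains t.1 && alphabet.contains t.2.1)
    (fun t : String × String × String => (t.1, t.2.1))
    (fun (d : PySem.Dict (String × String) Int) k => d.insert k (d.getD k 0 + 1))
    transitions PySem.Dict.empty
  have hc : pvCounts states alphabet transitions
      = PySem.Dict.counter ((transitions.filter (fun t => states.contains t.1 && alphabet.contains t.2.1)).map (fun t => (t.1, t.2.1))) := by
    unfold pvCounts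
    exact hc0.trans (PySem.Dict.foldl_insert_getD_add_one_eq_counter _)
  rw [hc]
  by_cases h1 : states.contains start_state = true
  · by_cases h2 : PySem.Set.issubset (PySem.Set.ofList accept_states) (PySem.Set.ofList states) = true
    · by_cases h3 : alphabet.length = 0
      · rw [if_neg (by simpa using h1), if_neg (by simpa using h2), if_pos (by simp [h3]), h3]
        simp
      · rw [if_neg (by simpa using h1), if_neg (by simpa using h2), if_neg (by simpa using h3)]
        have hall : (accept_states.all fun a => states.contains a) = true := by
          rw [← pv_subset_eq]; exact h2
        have hdec : decide (0 < alphabet.length) = true := by simp; omega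
        rw [h1, hall, hdec]
        simp only [Bool.true_and]
        exact pv_core states alphabet transitions
    · rw [if_neg (by simpa using h1), if_pos (by simpa using h2)]
      have hall : (accept_states.all fun a => states.contains a) = false := by
        rw [← pv_subset_eq]; exact Bool.eq_false_iff.mpr h2
      rw [hall]
      simp
  · rw [if_pos (by simpa using h1), Bool.eq_false_iff.mpr h1]
    simp
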